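-- pv_equiv track=rewrite | github.com/RMANOV/My-small-educational-projects | detective_for_couples8.py | create_unique_groups_of_devices_seen_together
-- ===== SOURCE A (Python) =====
-- from collections import defaultdict
--
-- def create_unique_groups_of_devices_seen_together(together):
--     counts = defaultdict(int)
--     for k, v in together.items():
--         pair = tuple(([k] + v))
--         counts[pair] += 1
--
--     sorted_counts = sorted(counts.items(), key=lambda x: x[1], reverse=True)
--
--     unique_groups_together = [x[0] for x in sorted_counts]
--
--     return unique_groups_together
-- ===== SOURCE B (Python) =====
-- def create_unique_groups_of_devices_seen_together(together):
--     # Keys of a dict are unique, so every tuple [k]+v is distinct, all counts are 1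
--     # and the stable reverse sort by count is a no-op: one linear pass suffices.
--     return [tuple([k] + v) for k, v in together.items()]
-- ===== Notes on version B (the rewrite author's own statement) =====
-- stated objective: simpler
-- what changed: B drops the defaultdict counting table and the sort-by-frequency entirely (dict keys are unique, so every count is 1 and the stable reverse sort preserves insertion order) and maps each item to its tuple in one linear pass.
import Mathlib
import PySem

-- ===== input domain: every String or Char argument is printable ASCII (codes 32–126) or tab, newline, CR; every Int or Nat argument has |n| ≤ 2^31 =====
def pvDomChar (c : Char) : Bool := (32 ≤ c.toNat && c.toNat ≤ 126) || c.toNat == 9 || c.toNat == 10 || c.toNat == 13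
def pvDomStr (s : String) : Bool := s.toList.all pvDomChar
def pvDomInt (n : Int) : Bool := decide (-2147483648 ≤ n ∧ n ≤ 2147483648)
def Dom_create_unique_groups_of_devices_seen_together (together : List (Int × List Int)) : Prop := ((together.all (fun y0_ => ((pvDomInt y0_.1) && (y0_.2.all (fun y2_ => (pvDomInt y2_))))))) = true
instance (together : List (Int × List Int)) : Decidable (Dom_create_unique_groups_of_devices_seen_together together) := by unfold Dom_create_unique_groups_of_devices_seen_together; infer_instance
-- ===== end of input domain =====

-- B replaces A's count-table-then-stable-reverse-sort with a single map over the items,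
-- which is correct because dict keys are unique (objective: simpler).

-- ===== PORT A =====
def create_unique_groups_of_devices_seen_together (together : List (Int × List Int)) : List (List Int) :=
  let counts : PySem.Dict (List Int) Int :=
    together.foldl (fun d kv => d.modify (kv.1 :: kv.2) 0 (· + 1)) PySem.Dict.empty
  let sorted_counts := PySem.List.sorted counts.items (fun x => x.2) true
  sorted_counts.map (fun x => x.1)

-- ===== PORT B =====
def create_unique_groups_of_devices_seen_together_alt (together : List (Int × List Int)) : List (List Int) :=
  together.map (fun kv => kv.1 :: kv.2)

-- ===== PRECONDITION & SPEC =====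
-- Pre_ states the dict invariant of A's Python parameter: 'together' is a dict, so its keys
-- are pairwise distinct; association lists with duplicate keys do not arise from any Python call.
def pvKeysDistinct : List Int → Bool
  | [] => true
  | x :: xs => (xs.all (fun y => decide (y ≠ x))) && pvKeysDistinct xs
def Pre_create_unique_groups_of_devices_seen_together (together : List (Int × List Int)) : Prop :=
  pvKeysDistinct (together.map Prod.fst) = true
instance (together : List (Int × List Int)) : Decidable (Pre_create_unique_groups_of_devices_seen_together together) := by unfold Pre_create_unique_groups_of_devices_seen_together; infer_instance

def pvWitness_create_unique_groups_of_devices_seen_together : (List (Int × List Int)) :=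
  [(1, [2, 3]), (4, []), (-2, [7])]

def Spec_create_unique_groups_of_devices_seen_together (together : List (Int × List Int)) (out : List (List Int)) : Prop := out = create_unique_groups_of_devices_seen_together_alt together
instance (together : List (Int × List Int)) (out : List (List Int)) : Decidable (Spec_create_unique_groups_of_devices_seen_together together out) := by unfold Spec_create_unique_groups_of_devices_seen_together; infer_instance

-- ===== CLAIM (what is proved, stated in full; the proofs are below) =====
def Claim_equal_create_unique_groups_of_devices_seen_together : Prop := ∀ (together : List (Int × List Int)), Dom_create_unique_groups_of_devices_seen_together together → Pre_create_unique_groups_of_devices_seen_together together → Spec_create_unique_groups_of_devices_seen_together together (create_unique_groups_of_devices_seen_together together)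

-- ===== LEMMAS AND PROOFS =====

theorem pvKeysDistinct_iff (l : List Int) : pvKeysDistinct l = true ↔ l.Nodup := by
  induction l with
  | nil => simp [pvKeysDistinct]
  | cons x xs ih =>
    simp only [pvKeysDistinct, Bool.and_eq_true, List.all_eq_true, decide_eq_true_eq,
      List.nodup_cons, ih]
    constructor
    · rintro ⟨h1, h2⟩
      exact ⟨fun hx => h1 x hx rfl, h2⟩
    · rintro ⟨h1, h2⟩
      exact ⟨fun y hy hyx => h1 (hyx ▸ hy), h2⟩

-- Distinct keys give distinct pairs: k::v is determined at its head by the key.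
theorem pv_pairs_nodup (together : List (Int × List Int))
    (h : (together.map Prod.fst).Nodup) :
    (together.map (fun kv => kv.1 :: kv.2)).Nodup := by
  have h2 : ((together.map (fun kv : Int × List Int => kv.1 :: kv.2)).map List.headI).Nodup := by
    rw [List.map_map]
    exact h
  exact List.Nodup.of_map _ h2

-- All counts are 1, so the (reversed) comparison key is constant along the list.
theorem pv_pairwise_one (L : List (List Int)) :
    List.Pairwise (fun a b : List Int × Int => b.2 ≤ a.2) (L.map (fun k => (k, (1 : Int)))) := by
  induction L with
  | nil => simp
  | cons x xs ih => simp_all [List.pairwise_cons]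

-- ===== VERDICT (by name: the statement is the Claim_ definition above) =====
theorem create_unique_groups_of_devices_seen_together_spec : Claim_equal_create_unique_groups_of_devices_seen_together := by
  intro together _ hpre
  have hnd : (together.map Prod.fst).Nodup := (pvKeysDistinct_iff _).mp hpre
  unfold Spec_create_unique_groups_of_devices_seen_together
  unfold create_unique_groups_of_devices_seen_together
  unfold create_unique_groups_of_devices_seen_together_alt
  have hL : (together.map (fun kv => kv.1 :: kv.2)).Nodup := pv_pairs_nodup together hnd
  have hc : together.foldl (fun (d : PySem.Dict (List Int) Int) kv => d.modify (kv.1 :: kv.2) 0 (· + 1)) PySem.Dict.empty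
      = PySem.Dict.counter (together.map (fun kv => kv.1 :: kv.2)) := by
    rw [PySem.Dict.counter_eq_foldl, List.foldl_map]
  dsimp only
  rw [hc, PySem.Dict.items_counter, PySem.Set.ofList_eq_self_of_nodup _ hL]
  have hcount : (together.map (fun kv => kv.1 :: kv.2)).map
        (fun k => (k, (List.count k (together.map (fun kv => kv.1 :: kv.2)) : Int)))
      = (together.map (fun kv => kv.1 :: kv.2)).map (fun k => (k, (1 : Int))) := by
    refine List.map_congr_left (fun k hk => ?_)
    rw [List.count_eq_one_of_mem hL hk]
    norm_num
  rw [hcount, PySem.List.sorted_rev_eq_self_of_pairwise _ _ (pv_pairwise_one _), List.map_map]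
  simp
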